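-- pv_equiv track=rewrite | github.com/together2329/pcie_debug_agent | src/simulators/enhanced_ai_analyzer.py | _assess_event_severity
-- ===== SOURCE A (Python) =====
-- def _assess_event_severity(log_entry: str) -> str:
--     """Assess severity of individual log event"""
--     log_lower = log_entry.lower()
--
--     if any(word in log_lower for word in ['critical', 'fatal', 'severe']):
--         return "CRITICAL"
--     elif any(word in log_lower for word in ['error', 'fail', 'invalid']):
--         return "HIGH"
--     elif any(word in log_lower for word in ['warning', 'retry', 'recovery']):
--         return "MEDIUM"
--     else:
--         return "LOW"
-- ===== SOURCE B (Python) =====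
-- def _assess_event_severity(log_entry: str) -> str:
--     """Assess severity by a single left-to-right position scan: at each index,
--     check which keywords start there (one keyword->priority table), keeping a
--     running maximum priority; no substring-membership tests, no early return."""
--     keyword_priority = {
--         'critical': 3, 'fatal': 3, 'severe': 3,
--         'error': 2, 'fail': 2, 'invalid': 2,
--         'warning': 1, 'retry': 1, 'recovery': 1,
--     }
--     s = log_entry.lower()
--     best = 0
--     for i in range(len(s)):
--         for word, prio in keyword_priority.items():
--             if best < prio and s.startswith(word, i):
--                 best = prio
--     return ('LOW', 'MEDIUM', 'HIGH', 'CRITICAL')[best]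
-- ===== Notes on version B (the rewrite author's own statement) =====
-- stated objective: alternative
-- what changed: Replaces per-keyword substring membership tests in a priority if/elif chain by a single left-to-right scan over string positions that checks which table keywords start at each position and keeps a running maximum priority, indexing a severity-name tuple at the end.
import Mathlib
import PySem

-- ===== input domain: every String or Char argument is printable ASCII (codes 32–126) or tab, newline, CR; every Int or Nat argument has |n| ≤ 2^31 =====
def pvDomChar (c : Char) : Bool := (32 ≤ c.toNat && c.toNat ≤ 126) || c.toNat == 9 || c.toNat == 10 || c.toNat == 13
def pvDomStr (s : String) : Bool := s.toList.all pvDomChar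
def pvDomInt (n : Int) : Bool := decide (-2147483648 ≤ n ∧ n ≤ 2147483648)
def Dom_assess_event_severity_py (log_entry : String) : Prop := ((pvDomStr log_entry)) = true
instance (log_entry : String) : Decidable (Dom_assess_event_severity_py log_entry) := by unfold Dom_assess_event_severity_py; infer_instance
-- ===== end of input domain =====

-- B replaces A's early-return if/elif substring-membership chain by a single position scan: at each index of the lowered string it checks which keywords of a keyword→priority table start there, keeps a running max priority and indexes a name tuple (alternative decomposition, same cost).


-- ===== PORT A =====
-- A: literal transliteration of the if/elif keyword-membership chain
def assess_event_severity_py (log_entry : String) : String :=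
  let log_lower := PySem.Str.lower log_entry
  if ["critical", "fatal", "severe"].any (fun w => PySem.Str.isIn w log_lower) then "CRITICAL"
  else if ["error", "fail", "invalid"].any (fun w => PySem.Str.isIn w log_lower) then "HIGH"
  else if ["warning", "retry", "recovery"].any (fun w => PySem.Str.isIn w log_lower) then "MEDIUM"
  else "LOW"

-- ===== PORT B =====
-- B-side helpers: the keyword→priority table of Source B, and its two for-loops as
-- named folds over the same state (running max priority).
def pvKw : List (String × Int) :=
  [("critical", 3), ("fatal", 3), ("severe", 3),
   ("error", 2), ("fail", 2), ("invalid", 2),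
   ("warning", 1), ("retry", 1), ("recovery", 1)]

-- inner loop 'for word, prio in keyword_priority.items(): if best < prio and s.startswith(word, i): best = prio'.
-- Python's s.startswith(word, i) with 0 ≤ i is exactly a prefix test on s[i:], ported as
-- PySem.Chars.startswith (s.drop i.toNat) word.toList (i comes from range(len(s)), so 0 ≤ i).
def pvInner (s : List Char) (i : Int) (b : Int) : Int :=
  pvKw.foldl (fun best wp =>
    if best < wp.2 ∧ PySem.Chars.startswith (s.drop i.toNat) wp.1.toList then wp.2 else best) b

-- outer loop 'for i in range(len(s)):'
def pvOuter (s : List Char) (l : List Int) (b : Int) : Int :=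
  l.foldl (fun b i => pvInner s i b) b

-- B: scan every position of the lowered string, keep the max priority of the
-- keywords starting there, then index the name tuple with it.
def assess_event_severity_py_alt (log_entry : String) : String :=
  let s : List Char := PySem.Chars.lower log_entry.toList
  let best : Int := pvOuter s (PySem.List.pyRange 0 (s.length : Int) 1) 0
  PySem.List.pyGetD ["LOW", "MEDIUM", "HIGH", "CRITICAL"] best "LOW"

-- ===== PRECONDITION & SPEC =====
def Spec_assess_event_severity_py (log_entry : String) (out : String) : Prop := out = assess_event_severity_py_alt log_entry
instance (log_entry : String) (out : String) : Decidable (Spec_assess_event_severity_py log_entry out) := by unfold Spec_assess_event_severity_py; infer_instance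

-- ===== CLAIM (what is proved, stated in full; the proofs are below) =====
def Claim_equal_assess_event_severity_py : Prop := ∀ (log_entry : String), Dom_assess_event_severity_py log_entry → Spec_assess_event_severity_py log_entry (assess_event_severity_py log_entry)

-- ===== LEMMAS AND PROOFS =====

lemma pvOuter_cons (s : List Char) (j : Int) (rest : List Int) (b : Int) :
    pvOuter s (j :: rest) b = pvOuter s rest (pvInner s j b) := by
  unfold pvOuter
  rw [List.foldl_cons]

-- facts about the inner loop, by induction on a generalized table
lemma pvInnerAux_le (s : List Char) (i : Int) (l : List (String × Int)) :
    ∀ b : Int, b ≤ l.foldl (fun best wp =>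
      if best < wp.2 ∧ PySem.Chars.startswith (s.drop i.toNat) wp.1.toList then wp.2 else best) b := by
  induction l with
  | nil => intro b; simp
  | cons x xs ih =>
    intro b
    simp only [List.foldl_cons]
    refine le_trans ?_ (ih _)
    split_ifs with h
    · exact le_of_lt h.1
    · exact le_rfl

lemma pvInnerAux_dom (s : List Char) (i : Int) (l : List (String × Int)) :
    ∀ b : Int, ∀ wp ∈ l, PySem.Chars.startswith (s.drop i.toNat) wp.1.toList = true →
      wp.2 ≤ l.foldl (fun best wp =>
        if best < wp.2 ∧ PySem.Chars.startswith (s.drop i.toNat) wp.1.toList then wp.2 else best) b := by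
  induction l with
  | nil => intro b wp hwp; simp at hwp
  | cons y ys ih =>
    intro b wp hwp hc
    simp only [List.foldl_cons]
    rcases List.mem_cons.mp hwp with hwp | hwp
    · subst hwp
      refine le_trans ?_ (pvInnerAux_le s i ys _)
      split_ifs with h
      · exact le_rfl
      · rcases lt_or_ge b wp.2 with hlt | hge
        · exact absurd ⟨hlt, hc⟩ h
        · exact hge
    · exact ih _ wp hwp hc

lemma pvInnerAux_mem (s : List Char) (i : Int) (l : List (String × Int)) :
    ∀ b : Int, l.foldl (fun best wp =>
        if best < wp.2 ∧ PySem.Chars.startswith (s.drop i.toNat) wp.1.toList then wp.2 else best) b = b ∨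
      ∃ wp ∈ l, PySem.Chars.startswith (s.drop i.toNat) wp.1.toList = true ∧
        l.foldl (fun best wp =>
          if best < wp.2 ∧ PySem.Chars.startswith (s.drop i.toNat) wp.1.toList then wp.2 else best) b = wp.2 := by
  induction l with
  | nil => intro b; left; rfl
  | cons y ys ih =>
    intro b
    simp only [List.foldl_cons]
    rcases ih (if b < y.2 ∧ PySem.Chars.startswith (s.drop i.toNat) y.1.toList then y.2 else b) with h | ⟨wp, hwp, hc, hval⟩
    · rw [h]
      split_ifs with hy
      · exact Or.inr ⟨y, List.mem_cons_self, hy.2, rfl⟩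
      · exact Or.inl rfl
    · exact Or.inr ⟨wp, List.mem_cons_of_mem y hwp, hc, hval⟩

lemma pvInner_le (s : List Char) (i : Int) (b : Int) : b ≤ pvInner s i b := by
  unfold pvInner
  exact pvInnerAux_le s i pvKw b

lemma pvInner_dom (s : List Char) (i : Int) (b : Int) (wp : String × Int) (h : wp ∈ pvKw)
    (hc : PySem.Chars.startswith (s.drop i.toNat) wp.1.toList = true) : wp.2 ≤ pvInner s i b := by
  unfold pvInner
  exact pvInnerAux_dom s i pvKw b wp h hc

lemma pvInner_mem (s : List Char) (i : Int) (b : Int) :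
    pvInner s i b = b ∨ ∃ wp ∈ pvKw,
      PySem.Chars.startswith (s.drop i.toNat) wp.1.toList = true ∧ pvInner s i b = wp.2 := by
  unfold pvInner
  exact pvInnerAux_mem s i pvKw b

-- the outer loop
lemma pvOuter_le (s : List Char) (l : List Int) : ∀ b : Int, b ≤ pvOuter s l b := by
  induction l with
  | nil => intro b; exact le_rfl
  | cons i rest ih =>
    intro b
    rw [pvOuter_cons]
    exact le_trans (pvInner_le s i b) (ih (pvInner s i b))

lemma pvOuter_dom (s : List Char) (l : List Int) :
    ∀ b : Int, ∀ i ∈ l, ∀ wp ∈ pvKw,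
      PySem.Chars.startswith (s.drop i.toNat) wp.1.toList = true → wp.2 ≤ pvOuter s l b := by
  induction l with
  | nil => intro b i hi; simp at hi
  | cons j rest ih =>
    intro b i hi wp hwp hc
    rw [pvOuter_cons]
    rcases List.mem_cons.mp hi with hi | hi
    · subst hi
      exact le_trans (pvInner_dom s i b wp hwp hc) (pvOuter_le s rest _)
    · exact ih _ i hi wp hwp hc

lemma pvOuter_mem (s : List Char) (l : List Int) :
    ∀ b : Int, pvOuter s l b = b ∨ ∃ i ∈ l, ∃ wp ∈ pvKw,
      PySem.Chars.startswith (s.drop i.toNat) wp.1.toList = true ∧ pvOuter s l b = wp.2 := by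
  induction l with
  | nil => intro b; left; rfl
  | cons j rest ih =>
    intro b
    rw [pvOuter_cons]
    rcases ih (pvInner s j b) with h | ⟨i, hi, wp, hwp, hc, hval⟩
    · rw [h]
      rcases pvInner_mem s j b with h2 | ⟨wp, hwp, hc, hval⟩
      · exact Or.inl h2
      · exact Or.inr ⟨j, List.mem_cons_self, wp, hwp, hc, hval⟩
    · exact Or.inr ⟨i, List.mem_cons_of_mem j hi, wp, hwp, hc, hval⟩

-- a word occurs as substring iff it starts at some scanned position
lemma pvHit_iff (t : List Char) (w : String) (hw : w.toList ≠ []) :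
    (∃ i ∈ PySem.List.pyRange 0 (t.length : Int) 1,
        PySem.Chars.startswith (t.drop i.toNat) w.toList = true) ↔
      PySem.Chars.isIn w.toList t = true := by
  constructor
  · rintro ⟨i, _, hc⟩
    rw [← PySem.Chars.exists_prefix_drop_iff_isIn]
    exact ⟨i.toNat, (PySem.Chars.startswith_iff _ _).1 hc⟩
  · intro h
    rw [← PySem.Chars.exists_prefix_drop_iff_isIn] at h
    rcases h with ⟨j, hj⟩
    have hjlt : j < t.length := by
      by_contra hge
      have hnil : t.drop j = [] := List.drop_eq_nil_of_le (by omega)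
      rw [hnil] at hj
      exact hw (List.prefix_nil.mp hj)
    refine ⟨(j : Int), ?_, ?_⟩
    · rw [PySem.List.mem_pyRange_one]
      omega
    · rw [PySem.Chars.startswith_iff]
      simpa using hj

-- the table's priorities are between 1 and 3
lemma pvKw_snd_bounds : ∀ wp ∈ pvKw, (1 : Int) ≤ wp.2 ∧ wp.2 ≤ 3 := by decide

-- the running max computed by B equals the highest matched group
lemma pvBest_eq (t : List Char) :
    pvOuter t (PySem.List.pyRange 0 (t.length : Int) 1) 0 =
      if ["critical", "fatal", "severe"].any (fun w => PySem.Chars.isIn w.toList t) then 3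
      else if ["error", "fail", "invalid"].any (fun w => PySem.Chars.isIn w.toList t) then 2
      else if ["warning", "retry", "recovery"].any (fun w => PySem.Chars.isIn w.toList t) then 1
      else 0 := by
  set r := pvOuter t (PySem.List.pyRange 0 (t.length : Int) 1) 0 with hr
  have hmem := pvOuter_mem t (PySem.List.pyRange 0 (t.length : Int) 1) 0
  rw [← hr] at hmem
  -- any matched word's priority bounds r from below
  have hdom : ∀ wp ∈ pvKw, PySem.Chars.isIn wp.1.toList t = true → wp.2 ≤ r := by
    intro wp hwp hin
    have hw : wp.1.toList ≠ [] := by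
      fin_cases hwp <;> decide
    rcases (pvHit_iff t wp.1 hw).2 hin with ⟨i, hi, hc⟩
    exact pvOuter_dom t _ 0 i hi wp hwp hc
  -- r is 0 or the priority of a matched word
  have hup : r = 0 ∨ ∃ wp ∈ pvKw, PySem.Chars.isIn wp.1.toList t = true ∧ r = wp.2 := by
    rcases hmem with h | ⟨i, hi, wp, hwp, hc, hval⟩
    · exact Or.inl h
    · refine Or.inr ⟨wp, hwp, ?_, hval⟩
      have hw : wp.1.toList ≠ [] := by fin_cases hwp <;> decide
      exact (pvHit_iff t wp.1 hw).1 ⟨i, hi, hc⟩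
  split_ifs with h3 h2 h1
  · simp only [List.any_eq_true] at h3
    rcases h3 with ⟨w, hwmem, hin⟩
    have h3r : (3 : Int) ≤ r := by
      fin_cases hwmem
      · exact hdom ("critical", 3) (by decide) hin
      · exact hdom ("fatal", 3) (by decide) hin
      · exact hdom ("severe", 3) (by decide) hin
    have hub : r ≤ 3 := by
      rcases hup with h | ⟨wp, hwp, _, hval⟩
      · omega
      · have := (pvKw_snd_bounds wp hwp).2; omega
    omega
  · simp only [List.any_eq_true] at h2 h3
    rcases h2 with ⟨w, hwmem, hin⟩
    have h2r : (2 : Int) ≤ r := by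
      fin_cases hwmem
      · exact hdom ("error", 2) (by decide) hin
      · exact hdom ("fail", 2) (by decide) hin
      · exact hdom ("invalid", 2) (by decide) hin
    have hub : r ≤ 2 := by
      rcases hup with h | ⟨wp, hwp, hinw, hval⟩
      · omega
      · simp only [pvKw, List.mem_cons, List.not_mem_nil, or_false] at hwp
        rcases hwp with rfl | rfl | rfl | rfl | rfl | rfl | rfl | rfl | rfl
        · exact absurd ⟨"critical", by simp, hinw⟩ h3
        · exact absurd ⟨"fatal", by simp, hinw⟩ h3
        · exact absurd ⟨"severe", by simp, hinw⟩ h3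
        all_goals omega
    omega
  · simp only [List.any_eq_true] at h1 h2 h3
    rcases h1 with ⟨w, hwmem, hin⟩
    have h1r : (1 : Int) ≤ r := by
      fin_cases hwmem
      · exact hdom ("warning", 1) (by decide) hin
      · exact hdom ("retry", 1) (by decide) hin
      · exact hdom ("recovery", 1) (by decide) hin
    have hub : r ≤ 1 := by
      rcases hup with h | ⟨wp, hwp, hinw, hval⟩
      · omega
      · simp only [pvKw, List.mem_cons, List.not_mem_nil, or_false] at hwp
        rcases hwp with rfl | rfl | rfl | rfl | rfl | rfl | rfl | rfl | rfl
        · exact absurd ⟨"critical", by simp, hinw⟩ h3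
        · exact absurd ⟨"fatal", by simp, hinw⟩ h3
        · exact absurd ⟨"severe", by simp, hinw⟩ h3
        · exact absurd ⟨"error", by simp, hinw⟩ h2
        · exact absurd ⟨"fail", by simp, hinw⟩ h2
        · exact absurd ⟨"invalid", by simp, hinw⟩ h2
        all_goals omega
    omega
  · simp only [List.any_eq_true] at h1 h2 h3
    rcases hup with h | ⟨wp, hwp, hinw, hval⟩
    · exact h
    · simp only [pvKw, List.mem_cons, List.not_mem_nil, or_false] at hwp
      rcases hwp with rfl | rfl | rfl | rfl | rfl | rfl | rfl | rfl | rfl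
      · exact absurd ⟨"critical", by simp, hinw⟩ h3
      · exact absurd ⟨"fatal", by simp, hinw⟩ h3
      · exact absurd ⟨"severe", by simp, hinw⟩ h3
      · exact absurd ⟨"error", by simp, hinw⟩ h2
      · exact absurd ⟨"fail", by simp, hinw⟩ h2
      · exact absurd ⟨"invalid", by simp, hinw⟩ h2
      · exact absurd ⟨"warning", by simp, hinw⟩ h1
      · exact absurd ⟨"retry", by simp, hinw⟩ h1
      · exact absurd ⟨"recovery", by simp, hinw⟩ h1

-- ===== VERDICT (by name: the statement is the Claim_ definition above) =====
theorem assess_event_severity_py_spec : Claim_equal_assess_event_severity_py := by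
  intro log_entry _
  unfold Spec_assess_event_severity_py
  unfold assess_event_severity_py_alt
  simp only []
  rw [pvBest_eq]
  unfold assess_event_severity_py
  simp only [PySem.Str.isIn_eq, PySem.Str.toList_lower]
  split_ifs <;> rfl
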